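-- pv_equiv track=rewrite | github.com/sergiorgiraldo/ai_for_the_win | labs/lab16b-ai-powered-threat-actors/solution/main.py | get_verification_protocol
-- ===== SOURCE A (Python) =====
-- from typing import Dict, List, Optional, Set
--
-- def get_verification_protocol(caller_claims: str) -> List[str]:
--     """Get verification steps based on claimed identity."""
--     base_protocol = [
--         "1. Tell caller you need to verify - legitimate callers expect this",
--         "2. Get a callback number and verify it independently",
--         "3. Call back using a known-good number from company directory",
--         "4. Use a pre-established code word if available",
--     ]
--
--     caller_lower = caller_claims.lower()
--
--     if any(term in caller_lower for term in ["executive", "ceo", "cfo", "cto", "president"]):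
--         base_protocol.extend(
--             [
--                 "5. EXECUTIVE CLAIM: Contact their assistant directly",
--                 "6. Verify through secondary channel (Slack, Teams, email)",
--                 "7. Involve your manager before taking any action",
--                 "8. Never process financial requests from voice-only requests",
--             ]
--         )
--
--     elif any(term in caller_lower for term in ["it", "helpdesk", "tech support"]):
--         base_protocol.extend(
--             [
--                 "5. IT CLAIM: Check if ticket exists for this request",
--                 "6. Verify caller's employee ID and department",
--                 "7. Never provide credentials over the phone",
--                 "8. IT should never need your password - they can reset it",
--             ]
--         )
--
--     elif any(term in caller_lower for term in ["vendor", "supplier", "contractor"]):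
--         base_protocol.extend(
--             [
--                 "5. VENDOR CLAIM: Verify against vendor contact list",
--                 "6. Call the vendor using known-good number",
--                 "7. Verify any payment changes through procurement",
--                 "8. Require email confirmation from known address",
--             ]
--         )
--
--     return base_protocol
-- ===== SOURCE B (Python) =====
-- def get_verification_protocol(caller_claims: str):
--     """Get verification steps based on claimed identity."""
--     base_protocol = [
--         "1. Tell caller you need to verify - legitimate callers expect this",
--         "2. Get a callback number and verify it independently",
--         "3. Call back using a known-good number from company directory",
--         "4. Use a pre-established code word if available",
--     ]
--     # flat keyword -> priority group (0 = executive, 1 = IT, 2 = vendor)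
--     keyword_group = {
--         "executive": 0, "ceo": 0, "cfo": 0, "cto": 0, "president": 0,
--         "it": 1, "helpdesk": 1, "tech support": 1,
--         "vendor": 2, "supplier": 2, "contractor": 2,
--     }
--     blocks = [
--         ["5. EXECUTIVE CLAIM: Contact their assistant directly",
--          "6. Verify through secondary channel (Slack, Teams, email)",
--          "7. Involve your manager before taking any action",
--          "8. Never process financial requests from voice-only requests"],
--         ["5. IT CLAIM: Check if ticket exists for this request",
--          "6. Verify caller's employee ID and department",
--          "7. Never provide credentials over the phone",
--          "8. IT should never need your password - they can reset it"],
--         ["5. VENDOR CLAIM: Verify against vendor contact list",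
--          "6. Call the vendor using known-good number",
--          "7. Verify any payment changes through procurement",
--          "8. Require email confirmation from known address"],
--         [],  # no claim matched
--     ]
--     caller_lower = caller_claims.lower()
--     # one flat pass: the smallest group index among matching keywords wins
--     best = 3
--     for kw, g in keyword_group.items():
--         if g < best and kw in caller_lower:
--             best = g
--     return base_protocol + blocks[best]
-- ===== Notes on version B (the rewrite author's own statement) =====
-- stated objective: alternative
-- what changed: Replaces the grouped if/elif any()-chain by a flat keyword-to-priority-group map scanned once to compute the minimal matching group index, which then selects the extension block from an indexed list.
import Mathlib
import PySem

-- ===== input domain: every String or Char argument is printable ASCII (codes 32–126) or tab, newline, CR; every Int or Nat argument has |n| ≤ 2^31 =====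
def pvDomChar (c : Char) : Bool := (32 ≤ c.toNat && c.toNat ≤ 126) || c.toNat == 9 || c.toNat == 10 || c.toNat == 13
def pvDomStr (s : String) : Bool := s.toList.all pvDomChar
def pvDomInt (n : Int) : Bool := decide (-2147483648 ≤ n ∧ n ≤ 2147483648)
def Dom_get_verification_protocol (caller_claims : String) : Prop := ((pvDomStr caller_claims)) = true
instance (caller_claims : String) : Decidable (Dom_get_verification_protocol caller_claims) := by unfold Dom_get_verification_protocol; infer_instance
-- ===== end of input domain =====

-- B replaces A's if/elif any()-chain by a flat keyword→group map: one pass computes the minimal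
-- matching group index, which indexes a list of extension blocks (alternative decomposition, same cost).

-- ===== PORT A =====
def get_verification_protocol (caller_claims : String) : List String :=
  let base_protocol : List String := [
    "1. Tell caller you need to verify - legitimate callers expect this",
    "2. Get a callback number and verify it independently",
    "3. Call back using a known-good number from company directory",
    "4. Use a pre-established code word if available"]
  let caller_lower := PySem.Str.lower caller_claims
  if ["executive", "ceo", "cfo", "cto", "president"].any (fun term => PySem.Str.isIn term caller_lower) then
    base_protocol ++ [
      "5. EXECUTIVE CLAIM: Contact their assistant directly",
      "6. Verify through secondary channel (Slack, Teams, email)",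
      "7. Involve your manager before taking any action",
      "8. Never process financial requests from voice-only requests"]
  else if ["it", "helpdesk", "tech support"].any (fun term => PySem.Str.isIn term caller_lower) then
    base_protocol ++ [
      "5. IT CLAIM: Check if ticket exists for this request",
      "6. Verify caller's employee ID and department",
      "7. Never provide credentials over the phone",
      "8. IT should never need your password - they can reset it"]
  else if ["vendor", "supplier", "contractor"].any (fun term => PySem.Str.isIn term caller_lower) then
    base_protocol ++ [
      "5. VENDOR CLAIM: Verify against vendor contact list",
      "6. Call the vendor using known-good number",
      "7. Verify any payment changes through procurement",
      "8. Require email confirmation from known address"]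
  else base_protocol

-- ===== PORT B =====
-- flat keyword → priority group map (dict iteration in insertion order)
def pvKeywordGroup : List (String × Nat) := [
  ("executive", 0), ("ceo", 0), ("cfo", 0), ("cto", 0), ("president", 0),
  ("it", 1), ("helpdesk", 1), ("tech support", 1),
  ("vendor", 2), ("supplier", 2), ("contractor", 2)]

def pvBlocks : List (List String) := [
  ["5. EXECUTIVE CLAIM: Contact their assistant directly",
   "6. Verify through secondary channel (Slack, Teams, email)",
   "7. Involve your manager before taking any action",
   "8. Never process financial requests from voice-only requests"],
  ["5. IT CLAIM: Check if ticket exists for this request",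
   "6. Verify caller's employee ID and department",
   "7. Never provide credentials over the phone",
   "8. IT should never need your password - they can reset it"],
  ["5. VENDOR CLAIM: Verify against vendor contact list",
   "6. Call the vendor using known-good number",
   "7. Verify any payment changes through procurement",
   "8. Require email confirmation from known address"],
  []]

def get_verification_protocol_alt (caller_claims : String) : List String :=
  let base_protocol : List String := [
    "1. Tell caller you need to verify - legitimate callers expect this",
    "2. Get a callback number and verify it independently",
    "3. Call back using a known-good number from company directory",
    "4. Use a pre-established code word if available"]
  let caller_lower := PySem.Str.lower caller_claims
  -- one flat pass: the smallest group index among matching keywords wins (3 = none)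
  let best := pvKeywordGroup.foldl
    (fun b kg => if kg.2 < b ∧ PySem.Str.isIn kg.1 caller_lower then kg.2 else b) 3
  base_protocol ++ pvBlocks.getD best []

-- ===== PRECONDITION & SPEC =====
def Spec_get_verification_protocol (caller_claims : String) (out : List String) : Prop := out = get_verification_protocol_alt caller_claims
instance (caller_claims : String) (out : List String) : Decidable (Spec_get_verification_protocol caller_claims out) := by unfold Spec_get_verification_protocol; infer_instance

-- ===== CLAIM (what is proved, stated in full; the proofs are below) =====
def Claim_equal_get_verification_protocol : Prop := ∀ (caller_claims : String), Dom_get_verification_protocol caller_claims → Spec_get_verification_protocol caller_claims (get_verification_protocol caller_claims)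

-- ===== LEMMAS AND PROOFS =====
-- folding a block of keywords that all carry the same group index g: the accumulator
-- drops to g exactly when g < b and some keyword matches
theorem pvFoldl_group (cl : String) (g : Nat) (ks : List String) : ∀ (b : Nat),
    List.foldl (fun b kg => if kg.2 < b ∧ PySem.Str.isIn kg.1 cl then kg.2 else b) b
        (ks.map (fun k => (k, g))) =
    if g < b ∧ ks.any (fun k => PySem.Str.isIn k cl) then g else b := by
  induction ks with
  | nil => intro b; simp
  | cons k ks ih =>
      intro b
      simp only [List.map_cons, List.foldl_cons, List.any_cons, Bool.or_eq_true]
      rw [ih]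
      by_cases hk : PySem.Str.isIn k cl = true <;> by_cases hg : g < b <;>
        simp_all [lt_self_iff_false]
      all_goals (intro h; rw [if_neg (by omega)] at h; omega)

theorem pvKeywordGroup_split : pvKeywordGroup =
    (["executive", "ceo", "cfo", "cto", "president"].map (fun k => (k, 0))) ++
    (["it", "helpdesk", "tech support"].map (fun k => (k, 1))) ++
    (["vendor", "supplier", "contractor"].map (fun k => (k, 2))) := rfl

-- ===== VERDICT (by name: the statement is the Claim_ definition above) =====
theorem get_verification_protocol_spec : Claim_equal_get_verification_protocol := by
  intro s _
  unfold Spec_get_verification_protocol get_verification_protocol get_verification_protocol_alt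
  rw [pvKeywordGroup_split]
  simp only [List.foldl_append]
  rw [pvFoldl_group, pvFoldl_group, pvFoldl_group]
  by_cases hE : (["executive", "ceo", "cfo", "cto", "president"].any
      (fun term => PySem.Str.isIn term (PySem.Str.lower s))) = true <;>
    by_cases hI : (["it", "helpdesk", "tech support"].any
      (fun term => PySem.Str.isIn term (PySem.Str.lower s))) = true <;>
    by_cases hV : (["vendor", "supplier", "contractor"].any
      (fun term => PySem.Str.isIn term (PySem.Str.lower s))) = true <;>
    simp only [hE, hI, hV, if_true, pvBlocks] <;>
    norm_num
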